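-- pv_equiv track=rewrite | github.com/JSLKM/thesis_blocking | fusion/ValueUtils.py | splitOnEvenCommas
-- ===== SOURCE A (Python) =====
-- def splitOnEvenCommas(s: str) -> list:
--     """
--     Splits the given string on the even commas (considering the first as 1)
--     :param s: string to be split.
--     :return: list of substrings resulting from the split on even commas
--     """
--     splitList = []
--     sb = ''
--     numCommas = 0
--     for i in range(len(s)):
--         if s[i] == ',':
--             numCommas += 1
--             if numCommas % 2 == 0:
--                 splitList.append(sb)
--                 sb = ''
--             else:
--                 sb = sb + ','
--         else:
--             sb = sb + s[i]
--     if len(sb) > 0: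
--         splitList.append(sb)
--     return splitList
-- ===== SOURCE B (Python) =====
-- def splitOnEvenCommas(s: str) -> list:
--     parts = s.split(',')
--     out = []
--     i = 0
--     while i + 1 < len(parts):
--         out.append(parts[i] + ',' + parts[i + 1])
--         i += 2
--     if i < len(parts) and parts[i] != '':
--         out.append(parts[i])
--     return out
-- ===== Notes on version B (the rewrite author's own statement) =====
-- stated objective: faster
-- what changed: Replaces the char-by-char comma-counting scan that concatenates strings one character at a time with a single str.split(',') followed by a step-by-two pass joining adjacent token pairs.
import Mathlib
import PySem

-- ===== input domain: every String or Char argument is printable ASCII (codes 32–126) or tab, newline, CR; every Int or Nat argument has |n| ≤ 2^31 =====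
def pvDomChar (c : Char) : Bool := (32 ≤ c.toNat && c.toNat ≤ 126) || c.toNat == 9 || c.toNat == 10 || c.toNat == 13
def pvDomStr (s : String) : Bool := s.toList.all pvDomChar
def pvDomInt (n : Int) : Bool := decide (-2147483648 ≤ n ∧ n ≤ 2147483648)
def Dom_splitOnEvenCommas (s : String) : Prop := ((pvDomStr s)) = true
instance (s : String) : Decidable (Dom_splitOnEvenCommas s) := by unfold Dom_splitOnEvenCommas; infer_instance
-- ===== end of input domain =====

-- B replaces A's char-by-char comma-counting scan with split(',') followed by a step-by-two pairing pass (simpler decomposition, same cost).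


-- ===== PORT A =====
-- literal transliteration: fold over the characters with state (splitList, sb, numCommas); pieces kept as List Char, made Strings at the end
def splitOnEvenCommas (s : String) : List String :=
  let fin := s.toList.foldl (fun (st : List (List Char) × List Char × Nat) c =>
      if c = ',' then
        if (st.2.2 + 1) % 2 == 0 then (st.1 ++ [st.2.1], [], st.2.2 + 1)
        else (st.1, st.2.1 ++ [','], st.2.2 + 1)
      else (st.1, st.2.1 ++ [c], st.2.2)) ([], [], 0)
  (if fin.2.1.length > 0 then fin.1 ++ [fin.2.1] else fin.1).map String.ofList

-- ===== PORT B =====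
-- the step-by-two pairing pass of Source B (while i+1 < len(parts): join pair; then the lone trailing token if non-empty)
def pvPairUp : List (List Char) → List (List Char)
  | a :: b :: rest => (a ++ ',' :: b) :: pvPairUp rest
  | [a] => if a = [] then [] else [a]
  | [] => []

def splitOnEvenCommas_alt (s : String) : List String :=
  (pvPairUp (PySem.Chars.splitOn s.toList [','])).map String.ofList

-- ===== PRECONDITION & SPEC =====
def Spec_splitOnEvenCommas (s : String) (out : List String) : Prop := out = splitOnEvenCommas_alt s
instance (s : String) (out : List String) : Decidable (Spec_splitOnEvenCommas s out) := by unfold Spec_splitOnEvenCommas; infer_instance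

-- ===== CLAIM (what is proved, stated in full; the proofs are below) =====
def Claim_equal_splitOnEvenCommas : Prop := ∀ (s : String), Dom_splitOnEvenCommas s → Spec_splitOnEvenCommas s (splitOnEvenCommas s)

-- ===== LEMMAS AND PROOFS =====

-- proof-side names for A's loop body and final append
def pvStep (st : List (List Char) × List Char × Nat) (c : Char) : List (List Char) × List Char × Nat :=
  if c = ',' then
    if (st.2.2 + 1) % 2 == 0 then (st.1 ++ [st.2.1], [], st.2.2 + 1)
    else (st.1, st.2.1 ++ [','], st.2.2 + 1)
  else (st.1, st.2.1 ++ [c], st.2.2)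

def pvFin (st : List (List Char) × List Char × Nat) : List (List Char) :=
  if st.2.1.length > 0 then st.1 ++ [st.2.1] else st.1

lemma splitOnEvenCommas_eq (s : String) :
    splitOnEvenCommas s = (pvFin (s.toList.foldl pvStep ([], [], 0))).map String.ofList := rfl

-- a structural characterisation of Python's split(',')
def pvSplit : List Char → List (List Char)
  | [] => [[]]
  | c :: t => if c = ',' then [] :: pvSplit t else
      match pvSplit t with
      | [] => [[c]]
      | h :: ts => (c :: h) :: ts

-- prepend a prefix to the first piece
def pvPreH (p : List Char) : List (List Char) → List (List Char)
  | [] => [p]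
  | h :: ts => (p ++ h) :: ts

lemma pvPreH_preH (a b : List Char) (xs : List (List Char)) :
    pvPreH a (pvPreH b xs) = pvPreH (a ++ b) xs := by
  cases xs <;> simp [pvPreH]

lemma pvSplit_ne_nil (l : List Char) : pvSplit l ≠ [] := by
  cases l with
  | nil => simp [pvSplit]
  | cons c t =>
    simp only [pvSplit]
    split_ifs
    · simp
    · cases h : pvSplit t <;> simp

lemma pvPreH_nil (xs : List (List Char)) (h : xs ≠ []) : pvPreH [] xs = xs := by
  cases xs with
  | nil => exact absurd rfl h
  | cons a t => simp [pvPreH]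

lemma pvSplit_cons (c : Char) (t : List Char) :
    pvSplit (c :: t) = if c = ',' then [] :: pvSplit t else pvPreH [c] (pvSplit t) := by
  simp only [pvSplit]
  split_ifs with h
  · rfl
  · cases hh : pvSplit t <;> simp [pvPreH]

lemma splitOn_go_spec (l : List Char) : ∀ (fuel : Nat) (cur : List Char) (acc : List (List Char)),
    l.length ≤ fuel →
    PySem.Chars.splitOn.go [','] fuel l cur acc = acc.reverse ++ pvPreH cur.reverse (pvSplit l) := by
  induction l with
  | nil =>
    intro fuel cur acc _
    cases fuel <;> simp [PySem.Chars.splitOn.go, pvSplit, pvPreH]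
  | cons c t ih =>
    intro fuel cur acc hf
    cases fuel with
    | zero => simp at hf
    | succ f =>
      rw [pvSplit_cons]
      by_cases hc : c = ','
      · subst hc
        have h1 : PySem.Chars.splitOn.go [','] (f+1) (',' :: t) cur acc
            = PySem.Chars.splitOn.go [','] f t [] (cur.reverse :: acc) := by
          simp [PySem.Chars.splitOn.go, List.isPrefixOf]
        rw [h1, ih f [] (cur.reverse :: acc) (by simpa using hf)]
        simp only [List.reverse_nil, List.reverse_cons,
          pvPreH_nil _ (pvSplit_ne_nil t)]
        simp [pvPreH]
      · have h1 : PySem.Chars.splitOn.go [','] (f+1) (c :: t) cur acc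
            = PySem.Chars.splitOn.go [','] f t (c :: cur) acc := by
          simp [PySem.Chars.splitOn.go, List.isPrefixOf, Ne.symm hc]
        rw [h1, ih f (c :: cur) acc (by simpa using hf), if_neg hc]
        rw [pvPreH_preH]
        simp

lemma splitOn_eq_pvSplit (l : List Char) : PySem.Chars.splitOn l [','] = pvSplit l := by
  have h := splitOn_go_spec l (l.length + 1) [] [] (by omega)
  simpa [PySem.Chars.splitOn, pvPreH_nil _ (pvSplit_ne_nil l)] using h

-- the pairing pass with a carried partial group sb and the comma parity
def pvGo2 : Bool → List Char → List (List Char) → List (List Char)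
  | _, sb, [] => if sb = [] then [] else [sb]
  | _, sb, [t] => if sb ++ t = [] then [] else [sb ++ t]
  | false, sb, t :: t2 :: ts => pvGo2 true (sb ++ t ++ [',']) (t2 :: ts)
  | true, sb, t :: t2 :: ts => (sb ++ t) :: pvGo2 false [] (t2 :: ts)

lemma pvGo2_preH (p : Bool) (sb a : List Char) (xs : List (List Char)) :
    pvGo2 p sb (pvPreH a xs) = pvGo2 p (sb ++ a) xs := by
  match xs with
  | [] => cases p <;> simp [pvPreH, pvGo2]
  | [t] => cases p <;> simp [pvPreH, pvGo2]
  | t :: t2 :: ts => cases p <;> simp [pvPreH, pvGo2]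

theorem pvPairUp_eq_go2 : ∀ xs : List (List Char), pvPairUp xs = pvGo2 false [] xs
  | [] => by simp [pvPairUp, pvGo2]
  | [a] => by simp [pvPairUp, pvGo2]
  | a :: b :: rest => by
    cases rest with
    | nil => simp [pvPairUp, pvGo2]
    | cons r rs =>
      have ih := pvPairUp_eq_go2 (r :: rs)
      simp [pvPairUp, pvGo2, ih]

-- A's loop + final append equals the pairing pass on pvSplit, for any starting state
lemma foldA_spec (l : List Char) : ∀ (out : List (List Char)) (sb : List Char) (n : Nat),
    pvFin (l.foldl pvStep (out, sb, n)) = out ++ pvGo2 (n % 2 == 1) sb (pvSplit l) := by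
  induction l with
  | nil =>
    intro out sb n
    simp only [List.foldl_nil, pvSplit, pvGo2, pvFin]
    by_cases h : sb = [] <;> simp [h, List.length_pos_iff]
  | cons c t ih =>
    intro out sb n
    rw [List.foldl_cons, pvSplit_cons]
    by_cases hc : c = ','
    · subst hc
      rw [if_pos rfl]
      by_cases hn : (n + 1) % 2 = 0
      · have hstep : pvStep (out, sb, n) ',' = (out ++ [sb], [], n + 1) := by
          simp [pvStep, hn]
        have hp : n % 2 = 1 := by omega
        have hp2 : (n + 1) % 2 ≠ 1 := by omega
        rw [hstep, ih (out ++ [sb]) [] (n + 1)]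
        simp only [hp, beq_self_eq_true]
        cases hs : pvSplit t with
        | nil => exact absurd hs (pvSplit_ne_nil t)
        | cons h ts =>
          cases ts <;> simp [pvGo2, hn]
      · have hstep : pvStep (out, sb, n) ',' = (out, sb ++ [','], n + 1) := by
          simp [pvStep, hn]
        have hz : n % 2 = 0 := by omega
        have hp2 : (n + 1) % 2 = 1 := by omega
        rw [hstep, ih out (sb ++ [',']) (n + 1)]
        simp only [hp2, beq_self_eq_true]
        cases hs : pvSplit t with
        | nil => exact absurd hs (pvSplit_ne_nil t)
        | cons h ts =>
          cases ts <;> simp [pvGo2, hz]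
    · have hstep : pvStep (out, sb, n) c = (out, sb ++ [c], n) := by
        simp [pvStep, hc]
      rw [hstep, ih out (sb ++ [c]) n, if_neg hc, pvGo2_preH]

-- ===== VERDICT (by name: the statement is the Claim_ definition above) =====
theorem splitOnEvenCommas_spec : Claim_equal_splitOnEvenCommas := by
  intro s _
  unfold Spec_splitOnEvenCommas splitOnEvenCommas_alt
  rw [splitOnEvenCommas_eq, splitOn_eq_pvSplit, pvPairUp_eq_go2]
  have h := foldA_spec s.toList [] [] 0
  simp only [Nat.zero_mod] at h
  rw [h]
  simp
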